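-- pv_equiv track=rewrite | github.com/YouAreMySunShine2/software_design | software_design/spiders/check_code/HammingCode.py | get_check_code
-- ===== SOURCE A (Python) =====
-- def get_data_array(_data):
--     _array_ = []
--     for i in str(bin(_data))[2:]:
--         _array_.append(i)
--     return _array_
--
-- def is_hamming_code(_index_):
--     _power_ = 0B1
--     while _power_ <= _index_:
--         if _power_ == _index_:
--             return True
--         else:
--             _power_ <<= 1
--     return False
--
-- def split_data_and_code(_data):
--     _array_ = get_data_array(_data)
--     _hamming_code_ = {}
--     _information_code_ = {}
--     _array_.reverse()
--     for index, value in enumerate(_array_):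
--         if is_hamming_code(index+1):
--             _hamming_code_[index+1] = value
--         else:
--             _information_code_[index+1] = value
--     return _hamming_code_, _information_code_
--
-- def get_check_code(_data):
--     _hamming_code_, _information_code_ = split_data_and_code(_data)
--     _check_code_ = {}
--     for _code_ in _hamming_code_:
--         _check_code_[_code_] = [_hamming_code_.get(_code_)]
--         for _index_ in _information_code_:
--             if _code_ == _code_ & _index_:
--                 _check_code_.get(_code_).append(_information_code_.get(_index_))
--     return _check_code_
-- ===== SOURCE B (Python) =====
-- def get_check_code(_data):
--     bits = bin(_data)[2:][::-1]
--     n = len(bits)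
--     result = {}
--     p = 1
--     while p <= n:
--         group = [bits[p - 1]]
--         # positions covered by parity p are the blocks [s, s+p) for s = p, 3p, 5p, ...
--         for start in range(p, n + 1, 2 * p):
--             for i in range(start, min(start + p, n + 1)):
--                 if i != p:
--                     group.append(bits[i - 1])
--         result[p] = group
--         p <<= 1
--     return result
-- ===== Notes on version B (the rewrite author's own statement) =====
-- stated objective: alternative
-- what changed: B replaces A's per-position power-of-two classifier, the two intermediate dicts and the parity-outer/all-info-inner bitmask scan by the textbook block-arithmetic construction: for each parity p it walks the arithmetic progression of block starts p, 3p, 5p, ... and takes the p consecutive positions of each block (skipping p itself), so no bitwise-AND coverage test and no position classification happen at all.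
import Mathlib
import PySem

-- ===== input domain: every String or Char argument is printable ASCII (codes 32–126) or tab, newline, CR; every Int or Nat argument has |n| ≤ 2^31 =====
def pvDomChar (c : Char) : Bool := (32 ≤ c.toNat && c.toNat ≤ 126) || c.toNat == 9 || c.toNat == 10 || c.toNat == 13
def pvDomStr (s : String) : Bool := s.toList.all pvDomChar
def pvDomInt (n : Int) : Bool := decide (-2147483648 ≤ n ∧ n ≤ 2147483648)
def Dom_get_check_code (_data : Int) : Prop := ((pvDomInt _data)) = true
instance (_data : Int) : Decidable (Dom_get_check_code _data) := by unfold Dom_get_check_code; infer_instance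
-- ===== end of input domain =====

-- B replaces A's per-position power-of-two classifier, intermediate dicts and bitmask coverage scan
-- by the textbook block construction: parity p covers the arithmetic blocks [s, s+p) for
-- s = p, 3p, 5p, …, walked directly (objective: alternative algorithm).

-- ===== PORT A =====

-- str(bin(_data))[2:], iterated char by char (each char is a 1-element Python str)
def get_data_array (_data : Int) : List String :=
  (PySem.List.slice (PySem.Int.pyBin _data).toList (some 2) none).foldl
    (fun acc c => acc ++ [String.ofList [c]]) []

-- the 'while _power_ <= _index_' loop; fuel i.natAbs + 1 is enough since _power_ starts at 1 and doubles
def is_hamming_code_loop : Nat → Int → Int → Bool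
  | 0, _, _ => false
  | fuel+1, power, index =>
    if power ≤ index then
      if power == index then true
      else is_hamming_code_loop fuel (power <<< 1) index
    else false

def is_hamming_code (_index_ : Int) : Bool :=
  is_hamming_code_loop (_index_.natAbs + 1) 1 _index_

def split_data_and_code (_data : Int) : PySem.Dict Int String × PySem.Dict Int String :=
  let _array_ := (get_data_array _data).reverse
  (PySem.List.enumerate _array_).foldl
    (fun (acc : PySem.Dict Int String × PySem.Dict Int String) q =>
      if is_hamming_code (q.1 + 1) then (acc.1.insert (q.1 + 1) q.2, acc.2)
      else (acc.1, acc.2.insert (q.1 + 1) q.2))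
    (PySem.Dict.empty, PySem.Dict.empty)

def get_check_code (_data : Int) : List (Int × List String) :=
  let hi := split_data_and_code _data
  let _hamming_code_ := hi.1
  let _information_code_ := hi.2
  let _check_code_ : PySem.Dict Int (List String) :=
    _hamming_code_.keys.foldl
      (fun acc _code_ =>
        -- .get(_code_) always hits: _code_ iterates _hamming_code_'s own keys (the .getD "" default is dead)
        let acc := acc.insert _code_ [_hamming_code_.getD _code_ ""]
        _information_code_.keys.foldl
          (fun acc2 _index_ =>
            if _code_ == PySem.Int.band _code_ _index_ then
              acc2.modify _code_ [] (fun l => l ++ [_information_code_.getD _index_ ""])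
            else acc2) acc)
      PySem.Dict.empty
  _check_code_.items

-- ===== PORT B =====

-- the 'while p <= n' loop of Source B; fuel n.natAbs + 1 is enough since p starts at 1 and doubles
def b_loop (bits : List String) (n : Int) : Nat → Int → PySem.Dict Int (List String) → PySem.Dict Int (List String)
  | 0, _, d => d
  | fuel+1, p, d =>
    if p ≤ n then
      let group := (PySem.List.pyRange p (n+1) (2*p)).foldl
        (fun g start =>
          (PySem.List.pyRange start (min (start+p) (n+1)) 1).foldl
            (fun g i => if i != p then g ++ [PySem.List.pyGetD bits (i-1) ""] else g) g)
        [PySem.List.pyGetD bits (p-1) ""]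
      b_loop bits n fuel (p <<< 1) (d.insert p group)
    else d

def get_check_code_alt (_data : Int) : List (Int × List String) :=
  -- bin(_data)[2:][::-1], a string, used only via len and single-char indexing
  let bits := ((PySem.List.slice (PySem.Int.pyBin _data).toList (some 2) none).map
    (fun c => String.ofList [c])).reverse
  let n : Int := PySem.List.len bits
  (b_loop bits n (n.natAbs + 1) 1 PySem.Dict.empty).items

-- ===== PRECONDITION & SPEC =====
def Spec_get_check_code (_data : Int) (out : List (Int × List String)) : Prop := out = get_check_code_alt _data
instance (_data : Int) (out : List (Int × List String)) : Decidable (Spec_get_check_code _data out) := by unfold Spec_get_check_code; infer_instance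

-- ===== CLAIM (what is proved, stated in full; the proofs are below) =====
def Claim_equal_get_check_code : Prop := ∀ (_data : Int), Dom_get_check_code _data → Spec_get_check_code _data (get_check_code _data)

-- ===== LEMMAS AND PROOFS =====

-- p << 1 is 2*p
theorem pv_shl1 (p : Int) : p <<< (1:Int) = 2 * p := by
  have h := Int.shiftLeft_eq_mul_pow p 1
  norm_num at h
  omega

-- generic: append-fold is map
theorem pv_foldl_append_eq_map {α β : Type} (l : List α) (f : α → β) (acc : List β) :
    l.foldl (fun a c => a ++ [f c]) acc = acc ++ l.map f := by
  induction l generalizing acc with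
  | nil => simp
  | cons x t ih => simp [ih]

-- the ascending list p, 2p, 4p, … ≤ n (fuel-driven, mirrors the two while-loops)
def pvPow (n : Int) : Nat → Int → List Int
  | 0, _ => []
  | fuel+1, p => if p ≤ n then p :: pvPow n fuel (p <<< 1) else []

theorem pvPow_mem_bounds (n : Int) (fuel : Nat) (p : Int) (hp : 0 < p) :
    ∀ x ∈ pvPow n fuel p, p ≤ x ∧ x ≤ n := by
  induction fuel generalizing p with
  | zero => simp [pvPow]
  | succ f ih =>
    intro x hx
    simp only [pvPow] at hx
    split at hx
    · rcases List.mem_cons.1 hx with h | h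
      · omega
      · have := ih (p <<< 1) (by rw [pv_shl1]; omega) x h
        rw [pv_shl1] at this
        omega
    · simp at hx

theorem pvPow_pairwise (n : Int) (fuel : Nat) (p : Int) (hp : 0 < p) :
    (pvPow n fuel p).Pairwise (· < ·) := by
  induction fuel generalizing p with
  | zero => simp [pvPow]
  | succ f ih =>
    simp only [pvPow]
    split
    · refine List.Pairwise.cons ?_ (ih (p <<< 1) (by rw [pv_shl1]; omega))
      intro x hx
      have := pvPow_mem_bounds n f (p <<< 1) (by rw [pv_shl1]; omega) x hx
      rw [pv_shl1] at this
      omega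
    · simp

-- A's is_hamming_code loop hits exactly the members of the doubling list
theorem pv_ham_mem (i n : Int) (hin : i ≤ n) :
    ∀ (f1 f2 : Nat) (p : Int), 0 < p → (i + 1 - p).toNat ≤ f1 → (n + 1 - p).toNat ≤ f2 →
    (is_hamming_code_loop f1 p i = true ↔ i ∈ pvPow n f2 p) := by
  intro f1
  induction f1 with
  | zero =>
    intro f2 p hp h1 h2
    have hpi : ¬ p ≤ i := by omega
    constructor
    · intro h; simp [is_hamming_code_loop] at h
    · intro h
      have := pvPow_mem_bounds n f2 p hp i h
      omega
  | succ f ih =>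
    intro f2 p hp h1 h2
    by_cases hpi : p ≤ i
    · have hpn : p ≤ n := by omega
      obtain ⟨f2', rfl⟩ : ∃ k, f2 = k + 1 := ⟨f2 - 1, by omega⟩
      simp only [is_hamming_code_loop, pvPow, if_pos hpi, if_pos hpn]
      by_cases hpe : p = i
      · simp [hpe]
      · have hbeq : (p == i) = false := by simp [hpe]
        rw [hbeq]
        simp only [Bool.false_eq_true, if_false, List.mem_cons]
        rw [ih f2' (p <<< 1) (by rw [pv_shl1]; omega)
          (by rw [pv_shl1]; omega) (by rw [pv_shl1]; omega)]
        constructor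
        · exact Or.inr
        · rintro (rfl | h)
          · exact absurd rfl hpe
          · exact h
    · constructor
      · intro h; simp [is_hamming_code_loop, hpi] at h
      · intro h
        have := pvPow_mem_bounds n f2 p hp i h
        omega

-- the split loop builds two append-only dicts
theorem pv_split_fold (l : List (Int × String)) (d1 d2 : PySem.Dict Int String)
    (hn : (l.map (fun q => q.1)).Nodup)
    (h1 : ∀ q ∈ l, d1.contains (q.1 + 1) = false)
    (h2 : ∀ q ∈ l, d2.contains (q.1 + 1) = false) :
    (l.foldl (fun (acc : PySem.Dict Int String × PySem.Dict Int String) q =>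
        if is_hamming_code (q.1 + 1) then (acc.1.insert (q.1 + 1) q.2, acc.2)
        else (acc.1, acc.2.insert (q.1 + 1) q.2)) (d1, d2)).1.items
      = d1.items ++ (l.filter (fun q => is_hamming_code (q.1 + 1))).map (fun q => (q.1 + 1, q.2))
    ∧ (l.foldl (fun (acc : PySem.Dict Int String × PySem.Dict Int String) q =>
        if is_hamming_code (q.1 + 1) then (acc.1.insert (q.1 + 1) q.2, acc.2)
        else (acc.1, acc.2.insert (q.1 + 1) q.2)) (d1, d2)).2.items
      = d2.items ++ (l.filter (fun q => !is_hamming_code (q.1 + 1))).map (fun q => (q.1 + 1, q.2)) := by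
  induction l generalizing d1 d2 with
  | nil => simp
  | cons q t ih =>
    rw [List.map_cons, List.nodup_cons] at hn
    obtain ⟨hq1, hnt⟩ := hn
    have hfr : ∀ r ∈ t, r.1 + 1 ≠ q.1 + 1 := by
      intro r hr hne
      exact hq1 (List.mem_map.mpr ⟨r, hr, by omega⟩)
    by_cases hh : is_hamming_code (q.1 + 1)
    · have := ih (d1.insert (q.1 + 1) q.2) d2 hnt
        (fun r hr => by
          rw [PySem.Dict.contains_insert]
          simp [hfr r hr, h1 r (List.mem_cons_of_mem _ hr)])
        (fun r hr => h2 r (List.mem_cons_of_mem _ hr))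
      simp only [List.foldl_cons, List.filter_cons, hh, if_true, Bool.not_true,
        Bool.false_eq_true, if_false]
      rw [this.1, this.2]
      rw [PySem.Dict.items_insert_of_not_contains _ _ (h1 q (List.mem_cons_self))]
      simp
    · have hhb : is_hamming_code (q.1 + 1) = false := by simpa using hh
      have := ih d1 (d2.insert (q.1 + 1) q.2) hnt
        (fun r hr => h1 r (List.mem_cons_of_mem _ hr))
        (fun r hr => by
          rw [PySem.Dict.contains_insert]
          simp [hfr r hr, h2 r (List.mem_cons_of_mem _ hr)])
      simp only [List.foldl_cons, List.filter_cons, hhb, Bool.not_false, if_true,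
        Bool.false_eq_true, if_false]
      rw [this.1, this.2]
      rw [PySem.Dict.items_insert_of_not_contains _ _ (h2 q (List.mem_cons_self))]
      simp

-- A's inner loop only grows the entry at _code_
theorem pv_A_inner (is_ : List Int) (p : Int) (F : Int → String)
    (d : PySem.Dict Int (List String)) (k' : Int) :
    (is_.foldl (fun acc2 _index_ =>
        if p == PySem.Int.band p _index_ then acc2.modify p [] (fun l => l ++ [F _index_])
        else acc2) d).getD k' []
    = if k' = p then d.getD p [] ++ (is_.filter (fun i => p == PySem.Int.band p i)).map F
      else d.getD k' [] := by
  induction is_ generalizing d with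
  | nil =>
    simp only [List.foldl_nil, List.filter_nil, List.map_nil, List.append_nil]
    split_ifs with h
    · subst h; rfl
    · rfl
  | cons i t ih =>
    simp only [List.foldl_cons, List.filter_cons]
    by_cases hc : p == PySem.Int.band p i
    · rw [if_pos hc, ih]
      simp only [hc, PySem.Dict.getD_modify]
      split_ifs with h1
      · subst h1; simp
      · simp
    · rw [if_neg (by simpa using hc), ih]
      simp [hc]

theorem pv_A_inner_keys (is_ : List Int) (p : Int) (F : Int → String)
    (d : PySem.Dict Int (List String)) (hc : d.contains p = true) :
    (is_.foldl (fun acc2 _index_ =>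
        if p == PySem.Int.band p _index_ then acc2.modify p [] (fun l => l ++ [F _index_])
        else acc2) d).keys = d.keys := by
  induction is_ generalizing d with
  | nil => rfl
  | cons i t ih =>
    simp only [List.foldl_cons]
    by_cases hcc : p == PySem.Int.band p i
    · rw [if_pos hcc]
      have hk : (d.modify p [] (fun l => l ++ [F i])).keys = d.keys := by
        rw [PySem.Dict.keys_modify, PySem.Dict.keys_insert_of_contains _ _ hc]
      rw [ih _ (by rw [PySem.Dict.contains_eq_decide_mem_keys] at hc ⊢; rw [hk]; exact hc), hk]
    · rw [if_neg (by simpa using hcc), ih _ hc]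

-- A's outer loop: one row per parity key
theorem pv_A_outer (ps : List Int) (is_ : List Int) (G F : Int → String)
    (acc : PySem.Dict Int (List String)) (hnd : ps.Nodup)
    (hacc : acc.keys.Nodup) (hfresh : ∀ p ∈ ps, p ∉ acc.keys) :
    (ps.foldl (fun acc0 _code_ =>
       is_.foldl (fun acc2 _index_ =>
          if _code_ == PySem.Int.band _code_ _index_ then
            acc2.modify _code_ [] (fun l => l ++ [F _index_])
          else acc2)
         (acc0.insert _code_ [G _code_])) acc).items
    = acc.items
      ++ ps.map (fun p => (p, G p :: (is_.filter (fun i => p == PySem.Int.band p i)).map F)) := by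
  induction ps generalizing acc with
  | nil => simp
  | cons p t ih =>
    rw [List.nodup_cons] at hnd
    obtain ⟨hpt, hndt⟩ := hnd
    have hpf : p ∉ acc.keys := hfresh p List.mem_cons_self
    have hcont : acc.contains p = false := by
      rw [PySem.Dict.contains_eq_decide_mem_keys]; simp [hpf]
    have hkeys1 : (acc.insert p [G p]).keys = acc.keys ++ [p] :=
      PySem.Dict.keys_insert_of_not_contains _ _ hcont
    have hc1 : (acc.insert p [G p]).contains p = true := PySem.Dict.contains_insert_self _ _ _
    simp only [List.foldl_cons]
    set d' := is_.foldl (fun acc2 _index_ =>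
          if p == PySem.Int.band p _index_ then
            acc2.modify p [] (fun l => l ++ [F _index_])
          else acc2) (acc.insert p [G p]) with hd'
    have hkeysd : d'.keys = acc.keys ++ [p] := by
      rw [hd', pv_A_inner_keys _ _ _ _ hc1, hkeys1]
    have hndd : d'.keys.Nodup := by
      rw [hkeysd]
      rw [List.nodup_append]
      refine ⟨hacc, List.nodup_singleton _, ?_⟩
      intro a ha b hb
      rw [List.mem_singleton] at hb
      subst hb
      exact fun h => hpf (h ▸ ha)
    have hitems : d'.items = acc.items ++ [(p, G p :: (is_.filter (fun i => p == PySem.Int.band p i)).map F)] := by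
      rw [PySem.Dict.items_eq_map_keys d' hndd [], hkeysd, List.map_append]
      congr 1
      · rw [PySem.Dict.items_eq_map_keys acc hacc []]
        apply List.map_congr_left
        intro k hk
        have hkp : k ≠ p := fun h => hpf (h ▸ hk)
        rw [hd', pv_A_inner, if_neg hkp, PySem.Dict.getD_insert, if_neg hkp]
      · simp only [List.map_cons, List.map_nil]
        rw [hd', pv_A_inner, if_pos rfl, PySem.Dict.getD_insert_self]
        rfl
    rw [ih d' hndt hndd (fun q hq => by
        rw [hkeysd]
        simp only [List.mem_append, List.mem_singleton]
        rintro (h | rfl)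
        · exact hfresh q (List.mem_cons_of_mem _ hq) h
        · exact hpt hq),
      hitems]
    simp

-- the reversed bit list both programs work on
def pvBits (_data : Int) : List String :=
  ((PySem.List.slice (PySem.Int.pyBin _data).toList (some 2) none).map
    (fun c => String.ofList [c])).reverse

def pvPk (L : Nat) : List Nat := (List.range L).filter (fun k : Nat => is_hamming_code ((k:Int)+1))
def pvIk (L : Nat) : List Nat := (List.range L).filter (fun k : Nat => !is_hamming_code ((k:Int)+1))
def pvP (L : Nat) : List Int := (pvPk L).map (fun k : Nat => (k:Int)+1)
def pvI (L : Nat) : List Int := (pvIk L).map (fun k : Nat => (k:Int)+1)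

theorem pv_array_rev (_data : Int) : (get_data_array _data).reverse = pvBits _data := by
  unfold get_data_array pvBits
  rw [pv_foldl_append_eq_map]
  simp

theorem pv_pyRange_len (L : Nat) :
    PySem.List.pyRange 0 (L:Int) = (List.range L).map (fun k : Nat => (k:Int)) := by
  rw [PySem.List.pyRange_one]
  simp only [sub_zero, Int.toNat_natCast, zero_add]

set_option maxHeartbeats 1000000 in
theorem pv_split_items (_data : Int) :
    (split_data_and_code _data).1.items
      = (pvPk (pvBits _data).length).map (fun k : Nat => ((k:Int)+1, PySem.List.pyGetD (pvBits _data) (k:Int) ""))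
    ∧ (split_data_and_code _data).2.items
      = (pvIk (pvBits _data).length).map (fun k : Nat => ((k:Int)+1, PySem.List.pyGetD (pvBits _data) (k:Int) "")) := by
  have hexp : split_data_and_code _data
      = (PySem.List.enumerate ((get_data_array _data).reverse)).foldl
          (fun (acc : PySem.Dict Int String × PySem.Dict Int String) q =>
            if is_hamming_code (q.1 + 1) then (acc.1.insert (q.1 + 1) q.2, acc.2)
            else (acc.1, acc.2.insert (q.1 + 1) q.2))
          (PySem.Dict.empty, PySem.Dict.empty) := rfl
  rw [hexp, pv_array_rev]
  set xs := pvBits _data with hxs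
  rw [PySem.List.enumerate_eq_map_pyRange xs "", PySem.List.len_eq, pv_pyRange_len, List.map_map]
  have hnodup : (((List.range xs.length).map (fun k : Nat => ((k:Int), PySem.List.pyGetD xs (k:Int) ""))).map (fun q => q.1)).Nodup := by
    rw [List.map_map]
    have : ((fun q : Int × String => q.1) ∘ fun k : Nat => ((k:Int), PySem.List.pyGetD xs (k:Int) "")) = (fun k : Nat => (k:Int)) := rfl
    rw [this]
    exact List.nodup_range.map (fun a b h => by omega)
  have hcomp : ((fun j : Int => (j, PySem.List.pyGetD xs j "")) ∘ fun k : Nat => (k:Int)) = (fun k : Nat => ((k:Int), PySem.List.pyGetD xs (k:Int) "")) := rfl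
  rw [hcomp]
  have hsf := pv_split_fold ((List.range xs.length).map (fun k : Nat => ((k:Int), PySem.List.pyGetD xs (k:Int) "")))
    PySem.Dict.empty PySem.Dict.empty hnodup
    (fun q _ => PySem.Dict.contains_empty _) (fun q _ => PySem.Dict.contains_empty _)
  rw [hsf.1, hsf.2]
  constructor
  all_goals rw [List.filter_map, List.map_map]
  · have hemp : (PySem.Dict.empty : PySem.Dict Int String).items = [] := rfl
    rw [hemp, List.nil_append]
    unfold pvPk
    refine congrArg₂ List.map ?_ ?_
    · funext k; rfl
    · exact List.filter_congr (fun k _ => rfl)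
  · have hemp : (PySem.Dict.empty : PySem.Dict Int String).items = [] := rfl
    rw [hemp, List.nil_append]
    unfold pvIk
    refine congrArg₂ List.map ?_ ?_
    · funext k; rfl
    · exact List.filter_congr (fun k _ => rfl)

theorem pv_pvP_nodup (L : Nat) : (pvP L).Nodup := by
  unfold pvP pvPk
  exact ((List.nodup_range).filter _).map (fun a b h => by omega)

theorem pv_pvP_pairwise (L : Nat) : (pvP L).Pairwise (· < ·) := by
  unfold pvP pvPk
  refine List.pairwise_map.mpr (List.Pairwise.imp ?_ ((List.pairwise_lt_range).filter _))
  intro a b h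
  omega

theorem pv_mem_pvP (L : Nat) (x : Int) :
    x ∈ pvP L ↔ (1 ≤ x ∧ x ≤ (L:Int) ∧ is_hamming_code x = true) := by
  unfold pvP pvPk
  simp only [List.mem_map, List.mem_filter, List.mem_range]
  constructor
  · rintro ⟨k, ⟨hk, hham⟩, rfl⟩
    exact ⟨by omega, by omega, hham⟩
  · rintro ⟨h1, h2, hham⟩
    refine ⟨(x - 1).toNat, ⟨by omega, ?_⟩, by omega⟩
    have : ((x - 1).toNat : Int) + 1 = x := by omega
    rw [this]
    exact hham

theorem pv_P_eq_pow (L : Nat) : pvP L = pvPow (L:Int) (L+1) 1 := by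
  have hmem : ∀ x, x ∈ pvPow (L:Int) (L+1) 1 ↔ x ∈ pvP L := by
    intro x
    rw [pv_mem_pvP]
    constructor
    · intro hx
      have hb := pvPow_mem_bounds (L:Int) (L+1) 1 (by omega) x hx
      refine ⟨by omega, by omega, ?_⟩
      exact (pv_ham_mem x (L:Int) (by omega) (x.natAbs+1) (L+1) 1 (by omega)
        (by omega) (by omega)).mpr hx
    · rintro ⟨h1, h2, hham⟩
      exact (pv_ham_mem x (L:Int) h2 (x.natAbs+1) (L+1) 1 (by omega)
        (by omega) (by omega)).mp hham
  have hperm : (pvPow (L:Int) (L+1) 1).Perm (pvP L) := by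
    rw [List.perm_ext_iff_of_nodup
      ((pvPow_pairwise (L:Int) (L+1) 1 (by omega)).imp ne_of_lt)
      ((pv_pvP_pairwise L).imp ne_of_lt)]
    exact hmem
  calc pvP L = PySem.List.sorted (pvP L) (fun x => x) :=
        (PySem.List.sorted_eq_self_of_pairwise _ _ ((pv_pvP_pairwise L).imp (fun h => le_of_lt h))).symm
    _ = pvPow (L:Int) (L+1) 1 :=
        PySem.List.sorted_eq_of_perm_of_pairwise_lt _ _ _ hperm
          (pvPow_pairwise (L:Int) (L+1) 1 (by omega))

theorem pv_ham_keys (_data : Int) :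
    (split_data_and_code _data).1.keys = pvP (pvBits _data).length := by
  have hk : (split_data_and_code _data).1.keys
      = (split_data_and_code _data).1.items.map (fun p => p.1) := rfl
  rw [hk, (pv_split_items _data).1, List.map_map]
  rfl

theorem pv_inf_keys (_data : Int) :
    (split_data_and_code _data).2.keys = pvI (pvBits _data).length := by
  have hk : (split_data_and_code _data).2.keys
      = (split_data_and_code _data).2.items.map (fun p => p.1) := rfl
  rw [hk, (pv_split_items _data).2, List.map_map]
  rfl

theorem pv_pvI_nodup (L : Nat) : (pvI L).Nodup := by
  unfold pvI pvIk
  exact ((List.nodup_range).filter _).map (fun a b h => by omega)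

theorem pv_ham_getD (_data : Int) (k : Nat) (hk : k ∈ pvPk (pvBits _data).length) :
    (split_data_and_code _data).1.getD ((k:Int)+1) "" = PySem.List.pyGetD (pvBits _data) (k:Int) "" := by
  apply PySem.Dict.getD_of_mem_items
  · rw [(pv_split_items _data).1]
    exact List.mem_map.mpr ⟨k, hk, rfl⟩
  · rw [pv_ham_keys]
    exact pv_pvP_nodup _

theorem pv_inf_getD (_data : Int) (k : Nat) (hk : k ∈ pvIk (pvBits _data).length) :
    (split_data_and_code _data).2.getD ((k:Int)+1) "" = PySem.List.pyGetD (pvBits _data) (k:Int) "" := by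
  apply PySem.Dict.getD_of_mem_items
  · rw [(pv_split_items _data).2]
    exact List.mem_map.mpr ⟨k, hk, rfl⟩
  · rw [pv_inf_keys]
    exact pv_pvI_nodup _

-- the common canonical value of both programs
def pvRow (_data : Int) (k : Nat) : Int × List String :=
  ((k:Int)+1, PySem.List.pyGetD (pvBits _data) (k:Int) "" ::
    ((pvIk (pvBits _data).length).filter
        (fun j : Nat => ((k:Int)+1) == PySem.Int.band ((k:Int)+1) ((j:Int)+1))).map
      (fun j : Nat => PySem.List.pyGetD (pvBits _data) (j:Int) ""))

theorem pv_A_items (_data : Int) :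
    get_check_code _data = (pvPk (pvBits _data).length).map (pvRow _data) := by
  have hexp : get_check_code _data
      = ((split_data_and_code _data).1.keys.foldl
          (fun acc0 _code_ =>
            (split_data_and_code _data).2.keys.foldl
              (fun acc2 _index_ =>
                if _code_ == PySem.Int.band _code_ _index_ then
                  acc2.modify _code_ [] (fun l => l ++ [(split_data_and_code _data).2.getD _index_ ""])
                else acc2)
              (acc0.insert _code_ [(split_data_and_code _data).1.getD _code_ ""]))
          PySem.Dict.empty).items := rfl
  rw [hexp]
  rw [pv_A_outer _ _ _ _ _ (by rw [pv_ham_keys]; exact pv_pvP_nodup _)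
    (by exact PySem.Dict.nodup_keys_empty)
    (fun p _ => by
      have : (PySem.Dict.empty : PySem.Dict Int (List String)).keys = [] := rfl
      rw [this]
      exact List.not_mem_nil)]
  have hemp : (PySem.Dict.empty : PySem.Dict Int (List String)).items = [] := rfl
  rw [hemp, List.nil_append, pv_ham_keys, pv_inf_keys]
  unfold pvP
  rw [List.map_map]
  apply List.map_congr_left
  intro k hk
  unfold pvRow
  simp only [Function.comp]
  refine congrArg (fun v => ((k:Int)+1, v)) ?_
  rw [pv_ham_getD _data k hk]
  refine congrArg (PySem.List.pyGetD (pvBits _data) (k:Int) "" :: ·) ?_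
  unfold pvI
  rw [List.filter_map, List.map_map]
  apply List.map_congr_left
  intro j hj
  simp only [Function.comp]
  exact pv_inf_getD _data j (List.mem_of_mem_filter hj)

-- ========== B side ==========

-- the group Source B builds for parity p (exactly the let-body of b_loop)
def pvBGroup (bits : List String) (n p : Int) : List String :=
  (PySem.List.pyRange p (n+1) (2*p)).foldl
    (fun g start =>
      (PySem.List.pyRange start (min (start+p) (n+1)) 1).foldl
        (fun g i => if i != p then g ++ [PySem.List.pyGetD bits (i-1) ""] else g) g)
    [PySem.List.pyGetD bits (p-1) ""]

-- the information positions Source B visits for parity p, in visiting order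
def pvPosB (p n : Int) : List Int :=
  (PySem.List.pyRange p (n+1) (2*p)).flatMap
    (fun s => (PySem.List.pyRange s (min (s+p) (n+1)) 1).filter (fun i => i != p))

theorem pv_group_eq (bits : List String) (n p : Int) :
    pvBGroup bits n p
      = PySem.List.pyGetD bits (p-1) "" :: (pvPosB p n).map (fun i => PySem.List.pyGetD bits (i-1) "") := by
  unfold pvBGroup pvPosB
  have hb : (fun (g : List String) (start : Int) =>
      (PySem.List.pyRange start (min (start+p) (n+1)) 1).foldl
        (fun g i => if i != p then g ++ [PySem.List.pyGetD bits (i-1) ""] else g) g)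
    = (fun g start => g ++ ((PySem.List.pyRange start (min (start+p) (n+1)) 1).filter
        (fun i => i != p)).map (fun i => PySem.List.pyGetD bits (i-1) "")) := by
    funext g s
    exact PySem.List.foldl_append_if _ _ _ _
  rw [hb, PySem.List.foldl_append_eq_flatMap, ← List.map_flatMap]
  rfl

theorem pv_b_loop_items (bits : List String) (n : Int) (fuel : Nat) :
    ∀ (p : Int) (d : PySem.Dict Int (List String)), 0 < p →
    (∀ x ∈ pvPow n fuel p, d.contains x = false) →
    (b_loop bits n fuel p d).items
      = d.items ++ (pvPow n fuel p).map (fun q => (q, pvBGroup bits n q)) := by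
  induction fuel with
  | zero => intro p d _ _; simp [b_loop, pvPow]
  | succ f ih =>
    intro p d hp hfr
    simp only [b_loop, pvPow]
    split
    · rename_i hpn
      have hmem : p ∈ pvPow n (f+1) p := by simp [pvPow, hpn]
      show (b_loop bits n f (p <<< 1) (d.insert p (pvBGroup bits n p))).items
        = d.items ++ List.map (fun q => (q, pvBGroup bits n q)) (p :: pvPow n f (p <<< 1))
      rw [ih (p <<< 1) (d.insert p (pvBGroup bits n p)) (by rw [pv_shl1]; omega)
          (fun x hx => by
            have hb := pvPow_mem_bounds n f (p <<< 1) (by rw [pv_shl1]; omega) x hx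
            rw [pv_shl1] at hb
            rw [PySem.Dict.contains_insert]
            have : ¬ (x = p) := by omega
            simp [this]
            apply hfr
            simp only [pvPow, if_pos hpn, List.mem_cons]
            right
            exact hx)]
      rw [PySem.Dict.items_insert_of_not_contains _ _ (hfr p hmem)]
      simp
    · simp

theorem pv_mem_posB (p n x : Int) (hp : 0 < p) :
    x ∈ pvPosB p n ↔ x ≠ p ∧ x ≤ n ∧ ∃ s : Int, p ≤ s ∧ s ≤ x ∧ x < s + p ∧ (2*p) ∣ (s - p) := by
  unfold pvPosB
  rw [List.mem_flatMap]
  constructor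
  · rintro ⟨s, hs, hx⟩
    rw [PySem.List.mem_pyRange_iff_of_pos (by omega)] at hs
    rw [List.mem_filter] at hx
    obtain ⟨hx1, hx2⟩ := hx
    rw [PySem.List.mem_pyRange_one] at hx1
    refine ⟨by simpa using hx2, by omega, s, by omega, by omega, by omega, hs.2.2⟩
  · rintro ⟨hne, hxn, s, h1, h2, h3, h4⟩
    refine ⟨s, ?_, ?_⟩
    · rw [PySem.List.mem_pyRange_iff_of_pos (by omega)]
      exact ⟨h1, by omega, h4⟩
    · rw [List.mem_filter, PySem.List.mem_pyRange_one]
      exact ⟨⟨h2, by omega⟩, by simpa using hne⟩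

-- block arithmetic: lying in some block [P+2Pk, P+2Pk+P) is exactly an odd quotient by P
theorem pv_block_iff (P m : Nat) (hP : 1 ≤ P) :
    (∃ s : Int, (P:Int) ≤ s ∧ s ≤ (m:Int) ∧ (m:Int) < s + (P:Int) ∧ ((2*(P:Int)) ∣ (s - (P:Int))))
      ↔ m / P % 2 = 1 := by
  constructor
  · rintro ⟨s, h1, h2, h3, c, hc⟩
    have hc0 : 0 ≤ c := by nlinarith
    have hck : ((c.toNat : Nat) : Int) = c := Int.toNat_of_nonneg hc0
    set k := c.toNat with hkdef
    have hlo : (2*k+1) * P ≤ m := by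
      have : (((2*k+1) * P : Nat) : Int) ≤ (m:Int) := by push_cast; rw [hck]; nlinarith
      exact_mod_cast this
    have hhi : m < (2*k+1+1) * P := by
      have : ((m:Nat):Int) < (((2*k+1+1) * P : Nat):Int) := by push_cast; rw [hck]; nlinarith
      exact_mod_cast this
    have hdiv : m / P = 2*k+1 := Nat.div_eq_of_lt_le hlo hhi
    omega
  · intro h
    have hm : P * (m / P) + m % P = m := Nat.div_add_mod m P
    have hrr : m % P < P := Nat.mod_lt _ (by omega)
    obtain ⟨k, hk⟩ : ∃ k, m / P = 2*k+1 := ⟨(m / P)/2, by omega⟩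
    rw [hk] at hm
    refine ⟨(P:Int) + 2*(P:Int)*(k:Int),
      by have : (0:Int) ≤ 2*(P:Int)*(k:Int) := by positivity
         omega,
      ?_, ?_, ⟨(k:Int), by ring⟩⟩
    · have hb : P * (2*k+1) ≤ m := Nat.le.intro hm
      have hbi : ((P * (2*k+1) : Nat) : Int) ≤ (m:Int) := by exact_mod_cast hb
      push_cast at hbi
      nlinarith
    · have hb2 : m < P * (2*k+1) + P := by nlinarith
      have hbi : (m:Int) < ((P * (2*k+1) + P : Nat) : Int) := by exact_mod_cast hb2
      push_cast at hbi
      nlinarith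

theorem pv_band_iff (e m : Nat) : ((2:Nat)^e &&& m = 2^e) ↔ m / 2^e % 2 = 1 := by
  rw [Nat.and_comm, Nat.and_two_pow, Nat.testBit_eq_decide_div_mod_eq]
  by_cases h : m / 2^e % 2 = 1
  · simp [h]
  · rw [decide_eq_false h]
    simp only [Bool.toNat_false, Nat.zero_mul]
    constructor
    · intro h0
      exact absurd h0.symm (Nat.two_pow_pos e).ne'
    · intro h1
      exact absurd h1 h

theorem pv_posB_mem_band (e : Nat) (n x : Int) (hx1 : 1 ≤ x) :
    x ∈ pvPosB ((2:Int)^e) n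
      ↔ (x ≠ (2:Int)^e ∧ x ≤ n ∧ ((2:Int)^e == PySem.Int.band ((2:Int)^e) x) = true) := by
  have hp : (0:Int) < 2^e := by positivity
  have hxm : x = ((x.toNat : Nat) : Int) := by omega
  have hcast : ((2:Int)^e) = (((2^e : Nat)):Int) := by push_cast; ring
  have hband : (((2:Int)^e == PySem.Int.band ((2:Int)^e) x) = true)
      ↔ ((2:Nat)^e &&& x.toNat = 2^e) := by
    rw [hxm, hcast, PySem.Int.band_natCast, beq_iff_eq, Nat.cast_inj]
    exact eq_comm
  rw [pv_mem_posB _ _ _ hp, hband, pv_band_iff,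
    ← pv_block_iff (2^e) x.toNat Nat.one_le_two_pow]
  constructor
  · rintro ⟨h1, h2, s, hs⟩
    refine ⟨h1, h2, s, ?_⟩
    rw [← hcast, ← hxm]
    exact hs
  · rintro ⟨h1, h2, s, hs⟩
    refine ⟨h1, h2, s, ?_⟩
    rw [← hcast, ← hxm] at hs
    exact hs

theorem pv_pvPow_is_pow (n : Int) (fuel : Nat) :
    ∀ (a : Nat) (x : Int), x ∈ pvPow n fuel ((2:Int)^a) → ∃ e : Nat, x = 2^e := by
  induction fuel with
  | zero => intro a x hx; simp [pvPow] at hx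
  | succ f ih =>
    intro a x hx
    simp only [pvPow] at hx
    split at hx
    · rcases List.mem_cons.1 hx with h | h
      · exact ⟨a, h⟩
      · have hsh : (2:Int)^a <<< 1 = 2^(a+1) := by rw [pv_shl1]; ring
        rw [hsh] at h
        exact ih (a+1) x h
    · simp at hx

theorem pv_pow_mem_pvPow (n : Int) :
    ∀ (k fuel a : Nat), k < fuel → (2:Int)^(a+k) ≤ n →
      (2:Int)^(a+k) ∈ pvPow n fuel ((2:Int)^a) := by
  intro k
  induction k with
  | zero =>
    intro fuel a hf hle
    cases fuel with
    | zero => omega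
    | succ f =>
      simp only [Nat.add_zero] at hle ⊢
      simp only [pvPow, if_pos hle]
      exact List.mem_cons_self
  | succ k ih =>
    intro fuel a hf hle
    cases fuel with
    | zero => omega
    | succ f =>
      have hcond : (2:Int)^a ≤ n :=
        le_trans (pow_le_pow_right₀ (by norm_num : (1:Int) ≤ 2) (by omega)) hle
      simp only [pvPow, if_pos hcond]
      apply List.mem_cons_of_mem
      have hsh : (2:Int)^a <<< 1 = 2^(a+1) := by rw [pv_shl1]; ring
      rw [hsh]
      have h2 := ih f (a+1) (by omega) (by rw [show a+1+k = a+(k+1) from by omega]; exact hle)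
      rw [show a+(k+1) = (a+1)+k from by omega]
      exact h2

theorem pv_ham_iff_pow (x : Int) (hx : 1 ≤ x) :
    is_hamming_code x = true ↔ ∃ e : Nat, x = 2^e := by
  have hone : ((2:Int)^0) = 1 := pow_zero 2
  constructor
  · intro h
    have hm := (pv_ham_mem x x le_rfl (x.natAbs+1) (x.natAbs+1) 1 one_pos
      (by omega) (by omega)).mp h
    rw [← hone] at hm
    exact pv_pvPow_is_pow x (x.natAbs+1) 0 x hm
  · rintro ⟨e, rfl⟩
    have hna : ((2:Int)^e).natAbs = 2^e := by
      have : ((2:Int)^e) = ((2^e : Nat) : Int) := by push_cast; ring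
      rw [this, Int.natAbs_natCast]
    have hfuel : e < ((2:Int)^e).natAbs + 1 := by
      rw [hna]
      have := @Nat.lt_two_pow_self e
      omega
    have hmem := pv_pow_mem_pvPow ((2:Int)^e) e (((2:Int)^e).natAbs + 1) 0 hfuel
      (by rw [Nat.zero_add])
    rw [Nat.zero_add, hone] at hmem
    exact (pv_ham_mem ((2:Int)^e) ((2:Int)^e) le_rfl _ _ 1 one_pos
      (by omega) (by omega)).mpr hmem

theorem pv_pow_band (e f : Nat)
    (h : ((2:Int)^e == PySem.Int.band ((2:Int)^e) ((2:Int)^f)) = true) :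
    (2:Int)^f = 2^e := by
  have hce : ((2:Int)^e) = (((2^e : Nat)):Int) := by push_cast; ring
  have hcf : ((2:Int)^f) = (((2^f : Nat)):Int) := by push_cast; ring
  rw [hce, hcf, PySem.Int.band_natCast, beq_iff_eq, Nat.cast_inj] at h
  rw [Nat.and_two_pow, Nat.testBit_two_pow] at h
  by_cases hef : e = f
  · rw [hef]
  · rw [decide_eq_false hef] at h
    simp only [Bool.toNat_false, Nat.zero_mul] at h
    exact absurd h.symm (Nat.two_pow_pos e).ne

theorem pv_posB_pairwise (p n : Int) (hp : 0 < p) : (pvPosB p n).Pairwise (· < ·) := by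
  unfold pvPosB
  rw [List.flatMap_def, PySem.List.pyRange_of_pos _ _ (by omega : (0:Int) < 2*p), List.map_map]
  rw [List.pairwise_flatten]
  constructor
  · intro l hl
    rw [List.mem_map] at hl
    obtain ⟨t, _, rfl⟩ := hl
    exact (PySem.List.pairwise_lt_pyRange_one _ _).filter _
  · rw [List.pairwise_map]
    refine List.Pairwise.imp ?_ (List.pairwise_lt_range)
    intro t t' htt x hx y hy
    simp only [Function.comp] at hx hy
    have hx1 := (List.mem_filter.mp hx).1
    have hy1 := (List.mem_filter.mp hy).1
    rw [PySem.List.mem_pyRange_one] at hx1 hy1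
    have htc : (t:Int) + 1 ≤ (t':Int) := by exact_mod_cast htt
    have hstep : p + 2*p*(t:Int) + p ≤ p + 2*p*(t':Int) := by nlinarith
    have hxu : x < p + 2*p*(t:Int) + p := by
      have := hx1.2
      omega
    have hyl : p + 2*p*(t':Int) ≤ y := hy1.1
    omega

-- the same information positions as A's row filter, 0-based
def pvPosA (p : Int) (L : Nat) : List Int :=
  ((pvIk L).filter (fun j : Nat => p == PySem.Int.band p ((j:Int)+1))).map (fun j : Nat => (j:Int)+1)

theorem pv_posA_pairwise (p : Int) (L : Nat) : (pvPosA p L).Pairwise (· < ·) := by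
  unfold pvPosA pvIk
  refine List.pairwise_map.mpr (List.Pairwise.imp ?_ (((List.pairwise_lt_range).filter _).filter _))
  intro a b h
  omega

theorem pv_mem_posA (p : Int) (L : Nat) (x : Int) :
    x ∈ pvPosA p L ↔ 1 ≤ x ∧ x ≤ (L:Int) ∧ is_hamming_code x = false
      ∧ (p == PySem.Int.band p x) = true := by
  unfold pvPosA pvIk
  simp only [List.mem_map, List.mem_filter, List.mem_range, Bool.not_eq_eq_eq_not, Bool.not_true]
  constructor
  · rintro ⟨j, ⟨⟨hj, hham⟩, hband⟩, rfl⟩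
    exact ⟨by omega, by omega, hham, hband⟩
  · rintro ⟨h1, h2, hham, hband⟩
    refine ⟨(x - 1).toNat, ⟨⟨by omega, ?_⟩, ?_⟩, by omega⟩
    · have hc : (((x - 1).toNat : Nat) : Int) + 1 = x := by omega
      rw [hc]
      exact hham
    · have hc : (((x - 1).toNat : Nat) : Int) + 1 = x := by omega
      rw [hc]
      exact hband

theorem pv_pos_eq (e : Nat) (L : Nat) :
    pvPosB ((2:Int)^e) (L:Int) = pvPosA ((2:Int)^e) L := by
  have hp : (0:Int) < 2^e := by positivity
  have hmem : ∀ x, x ∈ pvPosA ((2:Int)^e) L ↔ x ∈ pvPosB ((2:Int)^e) (L:Int) := by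
    intro x
    by_cases hx1 : 1 ≤ x
    · rw [pv_posB_mem_band e _ x hx1, pv_mem_posA]
      constructor
      · rintro ⟨_, hx2, hham, hband⟩
        refine ⟨?_, hx2, hband⟩
        rintro rfl
        have h1e : (1:Int) ≤ 2^e := by exact_mod_cast (Nat.one_le_two_pow : 1 ≤ 2^e)
        rw [(pv_ham_iff_pow ((2:Int)^e) h1e).mpr ⟨e, rfl⟩] at hham
        exact absurd hham (by simp)
      · rintro ⟨hne, hx2, hband⟩
        refine ⟨hx1, hx2, ?_, hband⟩
        by_contra hham
        rw [Bool.not_eq_false] at hham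
        obtain ⟨f, rfl⟩ := (pv_ham_iff_pow x hx1).mp hham
        exact hne (pv_pow_band e f hband)
    · constructor
      · intro h
        exact absurd ((pv_mem_posA _ _ _).mp h).1 hx1
      · intro h
        obtain ⟨_, _, s, hs1, hs2, _, _⟩ := (pv_mem_posB _ _ _ hp).mp h
        omega
  have hperm : (pvPosB ((2:Int)^e) (L:Int)).Perm (pvPosA ((2:Int)^e) L) := by
    rw [List.perm_ext_iff_of_nodup
      ((pv_posB_pairwise _ _ hp).imp ne_of_lt)
      ((pv_posA_pairwise _ _).imp ne_of_lt)]
    exact fun x => (hmem x).symm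
  calc pvPosB ((2:Int)^e) (L:Int)
      = PySem.List.sorted (pvPosB ((2:Int)^e) (L:Int)) (fun x => x) :=
        (PySem.List.sorted_eq_self_of_pairwise _ _
          ((pv_posB_pairwise _ _ hp).imp (fun h => le_of_lt h))).symm
    _ = pvPosA ((2:Int)^e) L :=
        PySem.List.sorted_eq_of_perm_of_pairwise_lt _ _ _ hperm.symm
          (pv_posA_pairwise _ _)

theorem pv_B_items (_data : Int) :
    get_check_code_alt _data = (pvPk (pvBits _data).length).map (pvRow _data) := by
  have hexp : get_check_code_alt _data
      = (b_loop (pvBits _data) (PySem.List.len (pvBits _data))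
          ((PySem.List.len (pvBits _data)).natAbs + 1) 1 PySem.Dict.empty).items := rfl
  rw [hexp]
  set L := (pvBits _data).length with hL
  have hlen : PySem.List.len (pvBits _data) = (L:Int) := PySem.List.len_eq _
  rw [hlen]
  have hfuel : ((L:Int)).natAbs + 1 = L + 1 := by simp
  rw [hfuel]
  rw [pv_b_loop_items _ _ _ 1 _ one_pos (fun x _ => PySem.Dict.contains_empty _)]
  have hemp : (PySem.Dict.empty : PySem.Dict Int (List String)).items = [] := rfl
  rw [hemp, List.nil_append, ← pv_P_eq_pow]
  unfold pvP
  rw [List.map_map]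
  apply List.map_congr_left
  intro k hk
  simp only [Function.comp]
  have hham : is_hamming_code ((k:Int)+1) = true := by
    unfold pvPk at hk
    exact (List.mem_filter.mp hk).2
  obtain ⟨e, he⟩ := (pv_ham_iff_pow ((k:Int)+1) (by omega)).mp hham
  rw [pv_group_eq]
  unfold pvRow
  refine congrArg (fun v => ((k:Int)+1, v)) ?_
  have h1 : ((k:Int)+1-1) = (k:Int) := by ring
  rw [h1]
  refine congrArg _ ?_
  rw [he, pv_pos_eq e L, ← he]
  unfold pvPosA
  rw [List.map_map]
  apply List.map_congr_left
  intro j _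
  simp only [Function.comp]
  have h2 : ((j:Int)+1-1) = (j:Int) := by ring
  rw [h2]

-- ===== VERDICT (by name: the statement is the Claim_ definition above) =====
theorem get_check_code_spec : Claim_equal_get_check_code := by
  intro _data _
  unfold Spec_get_check_code
  rw [pv_A_items, pv_B_items]
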